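-- pv_equiv track=rewrite | github.com/manwar/perlweeklychallenge-club | challenge-081/paulo-custodio/python/ch-1.py | base_strings
-- ===== SOURCE A (Python) =====
-- def base_strings(s):
--     bases = []
--     for i in range(1, len(s)+1):
--         if len(s)%i==0:
--             base = s[:i]
--             if base*int(len(s)/i) == s:
--                 bases.append(base)
--     return bases
-- ===== SOURCE B (Python) =====
-- def base_strings(s):
--     n = len(s)
--     if n == 0:
--         return []
--     q = (s + s).index(s, 1)      # smallest rotation shift = primitive period of s; it divides n
--     k = n // q
--     return [s[:q * j] for j in range(1, k + 1) if k % j == 0]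
-- ===== Notes on version B (the rewrite author's own statement) =====
-- stated objective: alternative
-- what changed: B finds the primitive period once with the classic doubling trick (s+s).index(s, 1) and then emits every base purely arithmetically as the prefixes of length q*j for the divisors j of n//q, eliminating A's per-divisor string construction and comparison.
import Mathlib
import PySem

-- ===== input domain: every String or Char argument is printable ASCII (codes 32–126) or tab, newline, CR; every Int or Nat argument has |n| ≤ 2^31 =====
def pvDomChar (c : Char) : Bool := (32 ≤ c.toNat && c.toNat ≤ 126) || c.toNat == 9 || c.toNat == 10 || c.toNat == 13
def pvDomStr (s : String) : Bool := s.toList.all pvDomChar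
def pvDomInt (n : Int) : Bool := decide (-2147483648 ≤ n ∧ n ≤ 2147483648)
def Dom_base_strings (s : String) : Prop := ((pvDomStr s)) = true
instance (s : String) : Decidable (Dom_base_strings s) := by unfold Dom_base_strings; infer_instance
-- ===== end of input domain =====

-- B finds the primitive period q once via the classic doubling trick (s+s).index(s, 1) and then
-- emits the bases purely arithmetically (prefixes of length q*j for the divisors j of n//q),
-- replacing A's per-divisor string comparison (alternative single-search algorithm).

-- ===== PORT A =====
def base_strings (s : String) : List String :=
  (PySem.List.pyRange 1 (PySem.Str.len s + 1)).foldl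
    (fun bases i =>
      if PySem.Int.mod (PySem.Str.len s) i == 0 then
        -- base = s[:i]; int(len(s)/i) is exact here (i divides len(s)), so it equals floor division
        if PySem.List.pyRepeat (PySem.Str.slice s none (some i)).toList
             (PySem.Int.floordiv (PySem.Str.len s) i) == s.toList then
          bases ++ [PySem.Str.slice s none (some i)]
        else bases
      else bases)
    []

-- ===== PORT B =====
def base_strings_alt (s : String) : List String :=
  let n := PySem.Str.len s
  if n == 0 then []
  else
    -- q = (s + s).index(s, 1): always found (at shift n at the latest), so .index = .find here
    let q := PySem.Str.findFrom (String.ofList (s.toList ++ s.toList)) s 1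
    let k := PySem.Int.floordiv n q
    ((PySem.List.pyRange 1 (k + 1)).filter (fun j => PySem.Int.mod k j == 0)).map
      (fun j => PySem.Str.slice s none (some (q * j)))

-- ===== PRECONDITION & SPEC =====
def Spec_base_strings (s : String) (out : List String) : Prop := out = base_strings_alt s
instance (s : String) (out : List String) : Decidable (Spec_base_strings s out) := by unfold Spec_base_strings; infer_instance

-- ===== CLAIM (what is proved, stated in full; the proofs are below) =====
def Claim_equal_base_strings : Prop := ∀ (s : String), Dom_base_strings s → Spec_base_strings s (base_strings s)

-- ===== LEMMAS AND PROOFS =====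

-- Core fact: for |l| = k*j, l is the j-prefix repeated k times  iff  l[j:] = l[:|l|-j].
theorem pv_period_iff (j : Nat) : ∀ (k : Nat) (l : List Char), l.length = k * j →
    ((List.replicate k (l.take j)).flatten = l ↔ l.drop j = l.take (l.length - j)) := by
  intro k
  induction k with
  | zero =>
    intro l hl
    have hnil : l = [] := List.eq_nil_of_length_eq_zero (by omega)
    subst hnil; simp
  | succ k ih =>
    intro l hl
    have hl' : l.length = k * j + j := by rw [hl]; ring
    have hjl : j ≤ l.length := by omega
    have ht : (l.take j).length = j := by simp [hjl]
    have hr : (l.drop j).length = k * j := by simp; omega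
    have hl2 : l.take j ++ l.drop j = l := List.take_append_drop j l
    rw [List.replicate_succ, List.flatten_cons]
    have hLiff : (l.take j ++ (List.replicate k (l.take j)).flatten = l) ↔
        ((List.replicate k (l.take j)).flatten = l.drop j) := by
      constructor
      · intro h
        apply List.append_cancel_left (as := l.take j)
        rw [hl2]; exact h
      · intro h; rw [h]; exact hl2
    rw [hLiff]
    have htk : l.length - j = k * j := by omega
    rw [htk]
    cases k with
    | zero =>
      have hr0 : l.drop j = [] := List.eq_nil_of_length_eq_zero (by simpa using hr)
      simp [hr0]
    | succ k' =>
      have hjk : j ≤ (k' + 1) * j := by nlinarith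
      have htake : l.take ((k' + 1) * j) =
          l.take j ++ (l.drop j).take ((k' + 1) * j - j) := by
        conv_lhs => rw [← hl2]
        rw [List.take_append, ht]
        congr 1
        exact List.take_of_length_le (by omega)
      rw [htake]
      have hrlen : (l.drop j).length - j = (k' + 1) * j - j := by omega
      constructor
      · intro h
        have hrt : (l.drop j).take j = l.take j := by
          rw [← h, List.replicate_succ, List.flatten_cons, List.take_left' ht]
        have h2 := (ih (l.drop j) hr).mp (by rw [hrt]; exact h)
        rw [hrlen] at h2
        rw [← h2, ← hrt]
        exact (List.take_append_drop j (l.drop j)).symm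
      · intro h
        have hrt : (l.drop j).take j = l.take j := by
          conv_lhs => rw [h]
          exact List.take_left' ht
        have hdr : (l.drop j).drop j = (l.drop j).take ((l.drop j).length - j) := by
          conv_lhs => rw [h]
          rw [List.drop_left' ht, hrlen]
        have := (ih (l.drop j) hr).mpr hdr
        rw [hrt] at this
        exact this

-- occurrence of l at shift p in l++l (1 ≤ p ≤ |l|)  ↔  l is fixed by rotation by p
theorem pv_occ_iff_rotate (l : List Char) (p : Nat) (hp : p ≤ l.length) :
    (l <+: (l ++ l).drop p) ↔ l.rotate p = l := by
  have hd : (l ++ l).drop p = l.drop p ++ l := List.drop_append_of_le_length hp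
  have htk : (l.drop p ++ l).take l.length = l.drop p ++ l.take p := by
    have h1 : l.length = (l.drop p).length + p := by simp; omega
    rw [h1, List.take_append]
    congr 1
    · exact List.take_of_length_le (by omega)
    · congr 1; omega
  rw [hd, List.prefix_iff_eq_take, htk, List.rotate_eq_drop_append_take hp, eq_comm]

-- rotation-fixedness is preserved by Nat multiples
theorem pv_rotate_mul (l : List Char) (q : Nat) (h : l.rotate q = l) (m : Nat) :
    l.rotate (m * q) = l := by
  induction m with
  | zero => simp
  | succ m ih =>
    have : (m + 1) * q = m * q + q := by ring
    rw [this, ← List.rotate_rotate, ih, h]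

-- a repetition of its j-prefix is fixed by rotation by j
theorem pv_rep_rotate (l : List Char) (j : Nat) (k : Nat) (hk : 0 < k)
    (hlen : l.length = k * j) (h : (List.replicate k (l.take j)).flatten = l) :
    l.rotate j = l := by
  obtain ⟨k', rfl⟩ : ∃ k', k = k' + 1 := ⟨k - 1, by omega⟩
  have hjl : j ≤ l.length := by nlinarith
  have ht : (l.take j).length = j := by simp [hjl]
  rw [List.rotate_eq_drop_append_take hjl]
  conv_lhs => rw [← h, List.replicate_succ, List.flatten_cons, List.drop_left' ht,
    List.take_left' ht]
  calc (List.replicate k' (l.take j)).flatten ++ l.take j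
      = (List.replicate (k' + 1) (l.take j)).flatten := by
        rw [List.replicate_succ', List.flatten_append, List.flatten_cons, List.flatten_nil,
          List.append_nil]
    _ = l := h

-- two strictly increasing Int lists with the same members are equal
theorem pv_eq_of_sorted_lt (xs : List Int) : ∀ (ys : List Int),
    xs.Pairwise (· < ·) → ys.Pairwise (· < ·) → (∀ a, a ∈ xs ↔ a ∈ ys) → xs = ys := by
  induction xs with
  | nil =>
    intro ys _ _ hm
    cases ys with
    | nil => rfl
    | cons b t => exact absurd ((hm b).mpr (by simp)) (by simp)
  | cons a xs ih =>
    intro ys hx hy hm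
    cases ys with
    | nil => exact absurd ((hm a).mp (by simp)) (by simp)
    | cons b t =>
      have hab : a = b := by
        rcases List.mem_cons.mp ((hm a).mp (by simp)) with h | h
        · exact h
        · rcases List.mem_cons.mp ((hm b).mpr (by simp)) with h' | h'
          · exact h'.symm
          · have h1 : b < a := (List.pairwise_cons.mp hy).1 a h
            have h2 : a < b := (List.pairwise_cons.mp hx).1 b h'
            omega
      subst hab
      congr 1
      apply ih t (List.pairwise_cons.mp hx).2 (List.pairwise_cons.mp hy).2
      intro c
      constructor
      · intro hc
        have : c ≠ a := by have := (List.pairwise_cons.mp hx).1 c hc; omega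
        rcases List.mem_cons.mp ((hm c).mp (by simp [hc])) with h | h
        · exact absurd h this
        · exact h
      · intro hc
        have : c ≠ a := by have := (List.pairwise_cons.mp hy).1 c hc; omega
        rcases List.mem_cons.mp ((hm c).mpr (by simp [hc])) with h | h
        · exact absurd h this
        · exact h


-- a rotation-fixed list satisfies the shift identity l[p:] = l[:len-p]
theorem pv_rotate_drop (l : List Char) (p : Nat) (hp : p ≤ l.length) (h : l.rotate p = l) :
    l.drop p = l.take (l.length - p) := by
  have e : l.drop p ++ l.take p = l := by rw [← List.rotate_eq_drop_append_take hp, h]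
  calc l.drop p = (l.drop p ++ l.take p).take (l.length - p) := by
        rw [List.take_left' (by simp)]
    _ = l.take (l.length - p) := by rw [e]

-- the least positive rotation fixing l divides every positive rotation fixing l
theorem pv_min_dvd (l : List Char) (q : Nat) (hq1 : 1 ≤ q) (hrotq : l.rotate q = l)
    (hmin : ∀ i, 1 ≤ i → i < q → l.rotate i ≠ l) (i : Nat) (hroti : l.rotate i = l) :
    q ∣ i := by
  have hr : l.rotate (i % q) = l := by
    have hmul := pv_rotate_mul l q hrotq (i / q)
    calc l.rotate (i % q) = (l.rotate (i / q * q)).rotate (i % q) := by rw [hmul]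
      _ = l.rotate (i / q * q + i % q) := List.rotate_rotate l _ _
      _ = l.rotate i := by congr 1; exact Nat.div_add_mod' i q
      _ = l := hroti
  rcases Nat.eq_zero_or_pos (i % q) with h0 | hpos
  · exact Nat.dvd_of_mod_eq_zero h0
  · exact absurd hr (hmin _ hpos (Nat.mod_lt _ (by omega)))

-- for a divisor length i of |l|: l is its i-prefix repeated  iff  q | i
theorem pv_divisor_iff (l : List Char) (hn : 0 < l.length) (q : Nat) (hq1 : 1 ≤ q)
    (hrotq : l.rotate q = l) (hmin : ∀ i, 1 ≤ i → i < q → l.rotate i ≠ l)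
    (i : Nat) (hi1 : 1 ≤ i) (hidvd : i ∣ l.length) :
    ((List.replicate (l.length / i) (l.take i)).flatten = l ↔ q ∣ i) := by
  have hin : i ≤ l.length := Nat.le_of_dvd hn hidvd
  have hk0 : 0 < l.length / i := Nat.div_pos hin (by omega)
  have hlen : l.length = (l.length / i) * i := (Nat.div_mul_cancel hidvd).symm
  constructor
  · intro h
    exact pv_min_dvd l q hq1 hrotq hmin i (pv_rep_rotate l i _ hk0 hlen h)
  · intro hqi
    obtain ⟨m, rfl⟩ := hqi
    have hrot : l.rotate (q * m) = l := by
      rw [mul_comm]; exact pv_rotate_mul l q hrotq m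
    exact (pv_period_iff _ _ l hlen).mpr (pv_rotate_drop l _ hin hrot)

-- the two filtered index lists coincide
theorem pv_lists (l : List Char) (q k : Nat) (hn : 0 < l.length) (hq1 : 1 ≤ q)
    (hrotq : l.rotate q = l) (hmin : ∀ i, 1 ≤ i → i < q → l.rotate i ≠ l)
    (hk : l.length = q * k) :
    (PySem.List.pyRange 1 ((l.length : Int) + 1)).filter
      (fun i => PySem.Int.mod (l.length : Int) i == 0 &&
        (PySem.List.pyRepeat (PySem.List.slice l none (some i))
          (PySem.Int.floordiv (l.length : Int) i) == l))
    = ((PySem.List.pyRange 1 ((k : Int) + 1)).filter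
        (fun j => PySem.Int.mod (k : Int) j == 0)).map (fun j => (q : Int) * j) := by
  have hq0 : (0 : Int) < (q : Int) := by exact_mod_cast hq1
  apply pv_eq_of_sorted_lt
  · exact List.Pairwise.filter _ (PySem.List.pairwise_lt_pyRange_one 1 _)
  · exact List.Pairwise.map _ (fun a b hab => by nlinarith)
      (List.Pairwise.filter _ (PySem.List.pairwise_lt_pyRange_one 1 _))
  · intro a
    constructor
    · intro ha
      rw [List.mem_filter, PySem.List.mem_pyRange_one] at ha
      obtain ⟨⟨ha1, ha2⟩, hcond⟩ := ha
      obtain ⟨i, rfl⟩ : ∃ i : Nat, a = (i : Int) :=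
        ⟨a.toNat, (Int.toNat_of_nonneg (by omega)).symm⟩
      have hi1 : 1 ≤ i := by exact_mod_cast ha1
      simp only [PySem.Int.mod_natCast, PySem.Int.floordiv_natCast,
        PySem.List.slice_to_natCast, Bool.and_eq_true, beq_iff_eq] at hcond
      have hidvd : i ∣ l.length := by
        have : l.length % i = 0 := by exact_mod_cast hcond.1
        exact Nat.dvd_of_mod_eq_zero this
      have hrep : (List.replicate (l.length / i) (l.take i)).flatten = l := by
        have := hcond.2
        simpa [PySem.List.pyRepeat] using this
      have hqi : q ∣ i := (pv_divisor_iff l hn q hq1 hrotq hmin i hi1 hidvd).mp hrep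
      obtain ⟨j, rfl⟩ := hqi
      have hjk : j ∣ k := by
        rw [hk] at hidvd
        exact (Nat.mul_dvd_mul_iff_left (by omega)).mp hidvd
      have hj1 : 1 ≤ j := by
        rcases Nat.eq_zero_or_pos j with rfl | h
        · simp at hi1
        · exact h
      have hk1 : 1 ≤ k := by
        rcases Nat.eq_zero_or_pos k with h0 | h; · rw [hk, h0] at hn; omega
        · exact h
      rw [List.mem_map]
      refine ⟨(j : Int), ?_, by push_cast; ring⟩
      rw [List.mem_filter, PySem.List.mem_pyRange_one]
      have hjlek : j ≤ k := Nat.le_of_dvd hk1 hjk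
      refine ⟨⟨by exact_mod_cast hj1, by exact_mod_cast (by omega : (j:Int) < (k:Int)+1)⟩, ?_⟩
      simp only [PySem.Int.mod_natCast, beq_iff_eq]
      have hz : k % j = 0 := Nat.dvd_iff_mod_eq_zero.mp hjk
      exact_mod_cast hz
    · intro ha
      rw [List.mem_map] at ha
      obtain ⟨b, hb, rfl⟩ := ha
      rw [List.mem_filter, PySem.List.mem_pyRange_one] at hb
      obtain ⟨⟨hb1, hb2⟩, hcond⟩ := hb
      obtain ⟨j, rfl⟩ : ∃ j : Nat, b = (j : Int) :=
        ⟨b.toNat, (Int.toNat_of_nonneg (by omega)).symm⟩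
      have hj1 : 1 ≤ j := by exact_mod_cast hb1
      have hjk : j ∣ k := by
        simp only [PySem.Int.mod_natCast, beq_iff_eq] at hcond
        exact Nat.dvd_of_mod_eq_zero (by exact_mod_cast hcond)
      set i := q * j with hi
      have hidvd : i ∣ l.length := by rw [hk]; exact Nat.mul_dvd_mul_left q hjk
      have hi1 : 1 ≤ i := by exact Nat.one_le_iff_ne_zero.mpr (by positivity)
      have hin : i ≤ l.length := Nat.le_of_dvd hn hidvd
      have hrep : (List.replicate (l.length / i) (l.take i)).flatten = l :=
        (pv_divisor_iff l hn q hq1 hrotq hmin i hi1 hidvd).mpr ⟨j, rfl⟩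
      rw [List.mem_filter, PySem.List.mem_pyRange_one]
      have hqj : (q : Int) * (j : Int) = ((i : Nat) : Int) := by push_cast [hi]; ring
      rw [hqj]
      refine ⟨⟨by exact_mod_cast hi1, by exact_mod_cast (by omega : (i:Int) < (l.length:Int)+1)⟩, ?_⟩
      simp only [PySem.Int.mod_natCast, PySem.Int.floordiv_natCast,
        PySem.List.slice_to_natCast, Bool.and_eq_true, beq_iff_eq]
      constructor
      · have hz : l.length % i = 0 := Nat.dvd_iff_mod_eq_zero.mp hidvd
        exact_mod_cast hz
      · simpa [PySem.List.pyRepeat] using hrep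

-- ===== VERDICT (by name: the statement is the Claim_ definition above) =====
theorem base_strings_spec : Claim_equal_base_strings := by
  intro s _
  unfold Spec_base_strings base_strings base_strings_alt
  have hb : ∀ (bases : List String) (i : Int),
      (if PySem.Int.mod (PySem.Str.len s) i == 0 then
        if PySem.List.pyRepeat (PySem.Str.slice s none (some i)).toList
             (PySem.Int.floordiv (PySem.Str.len s) i) == s.toList then
          bases ++ [PySem.Str.slice s none (some i)]
        else bases
      else bases)
      = (if (PySem.Int.mod (PySem.Str.len s) i == 0 &&
            (PySem.List.pyRepeat (PySem.Str.slice s none (some i)).toList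
              (PySem.Int.floordiv (PySem.Str.len s) i) == s.toList)) then
          bases ++ [PySem.Str.slice s none (some i)]
        else bases) := by
    intro bases i
    by_cases h1 : PySem.Int.mod ((s.length : Int)) i = 0 <;>
      by_cases h2 : PySem.List.pyRepeat (PySem.Chars.slice s.toList none (some i))
        (PySem.Int.floordiv ((s.length : Int)) i) = s.toList <;>
      simp_all
  simp only [hb]
  rw [PySem.List.foldl_append_if]
  simp only [List.nil_append]
  have hlen : PySem.Str.len s = (s.toList.length : Int) := by simp [PySem.Str.len_eq]
  by_cases hn : s.toList.length = 0
  · have hl0 : PySem.Str.len s = 0 := by rw [hlen, hn]; norm_num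
    rw [hl0]
    norm_num [PySem.List.pyRange_one_eq_nil]
  · have hn' : 0 < s.toList.length := Nat.pos_of_ne_zero hn
    have htl : (String.ofList (s.toList ++ s.toList)).toList = s.toList ++ s.toList :=
      String.toList_ofList
    have hfc : PySem.Str.findFrom (String.ofList (s.toList ++ s.toList)) s 1 =
        PySem.Chars.findFrom (s.toList ++ s.toList) s.toList 1 := by
      rw [PySem.Str.findFrom_eq, htl]
    have h1le : (1 : Nat) ≤ (s.toList ++ s.toList).length := by rw [List.length_append]; omega
    have hne : PySem.Chars.findFrom (s.toList ++ s.toList) s.toList ((1 : Nat) : Int) ≠ -1 := by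
      intro hcontra
      apply (PySem.Chars.findFrom_natCast_eq_neg_one_iff (s.toList ++ s.toList) s.toList 1
        h1le).mp hcontra
      rw [List.drop_append_of_le_length (by omega)]
      exact (List.suffix_append (s.toList.drop 1) s.toList).isInfix
    have hspec := PySem.Chars.findFrom_natCast_spec (s.toList ++ s.toList) s.toList 1 h1le hne
    simp only [Nat.cast_one] at hspec hne
    obtain ⟨h1f, hpre, hminO⟩ := hspec
    have hf0 : 0 ≤ PySem.Chars.findFrom (s.toList ++ s.toList) s.toList 1 := by omega
    set q := (PySem.Chars.findFrom (s.toList ++ s.toList) s.toList 1).toNat with hqdef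
    have hfq : PySem.Chars.findFrom (s.toList ++ s.toList) s.toList 1 = (q : Int) :=
      (Int.toNat_of_nonneg hf0).symm
    have hq1 : 1 ≤ q := by
      rw [hfq] at h1f
      exact_mod_cast h1f
    have hqn : q ≤ s.toList.length := by
      by_contra hqgt
      rw [not_le] at hqgt
      exact hminO s.toList.length (by omega) (by omega)
        (by rw [List.drop_left' rfl])
    have hrotq : s.toList.rotate q = s.toList := (pv_occ_iff_rotate s.toList q hqn).mp hpre
    have hmin : ∀ i, 1 ≤ i → i < q → s.toList.rotate i ≠ s.toList := fun i hi1 hi2 hrot =>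
      hminO i hi1 hi2 ((pv_occ_iff_rotate s.toList i (by omega)).mpr hrot)
    have hqdvd : q ∣ s.toList.length :=
      pv_min_dvd s.toList q hq1 hrotq hmin s.toList.length (List.rotate_length s.toList)
    have hk : s.toList.length = q * (s.toList.length / q) := (Nat.mul_div_cancel' hqdvd).symm
    have hnz : ((PySem.Str.len s) == 0) = false := by
      rw [hlen]
      exact beq_eq_false_iff_ne.mpr (by exact_mod_cast hn)
    simp only [hnz, Bool.false_eq_true, if_false, hfc, hfq]
    have hfd : PySem.Int.floordiv (PySem.Str.len s) ((q : Nat) : Int) =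
        ((s.toList.length / q : Nat) : Int) := by
      rw [hlen, PySem.Int.floordiv_natCast]
    rw [hfd]
    have hmapeq : (fun i : Int => PySem.Str.slice s none (some i)) ∘
        (fun j : Int => ((q : Nat) : Int) * j)
        = (fun j : Int => PySem.Str.slice s none (some (((q : Nat) : Int) * j))) := rfl
    rw [show (PySem.List.pyRange 1 (PySem.Str.len s + 1)).filter
          (fun i => PySem.Int.mod (PySem.Str.len s) i == 0 &&
            (PySem.List.pyRepeat (PySem.Str.slice s none (some i)).toList
              (PySem.Int.floordiv (PySem.Str.len s) i) == s.toList))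
        = (PySem.List.pyRange 1 ((s.toList.length : Int) + 1)).filter
          (fun i => PySem.Int.mod (s.toList.length : Int) i == 0 &&
            (PySem.List.pyRepeat (PySem.List.slice s.toList none (some i))
              (PySem.Int.floordiv (s.toList.length : Int) i) == s.toList)) from by
      simp only [hlen, PySem.Str.toList_slice, PySem.Chars.slice_eq_listSlice]]
    rw [pv_lists s.toList q (s.toList.length / q) hn' hq1 hrotq hmin hk, List.map_map, hmapeq]
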